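-- pv_equiv track=rewrite | github.com/jhenriquezs/transitionPatternsCounter | Ito/ito_to_tikz.py | terdimension
-- ===== SOURCE A (Python) =====
-- def terdimension(posicion,array):
--     if (posicion == "front"):
--         for i in range(len(array)):
--             array[i][2] += 3
--     elif(posicion == "bottom" or posicion == "top"):
--         for i in range(len(array)):
--             array[i][2], array[i][1] = array[i][1], array[i][2]
--             if (posicion == "top"):
--                 array[i][1] +=3
--     elif(posicion == "left" or posicion == "right"):
--         for i in range(len(array)):
--             array[i][2], array[i][0] = array[i][0], array[i][2]
--             if (posicion == "right"):
--                 array[i][0] += 3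
--     return array
-- ===== SOURCE B (Python) =====
-- # Each orientation is an affine map: new_xyz = M @ xyz + v (M a permutation matrix).
-- _AFFINE = {
--     "front":  (((1, 0, 0), (0, 1, 0), (0, 0, 1)), (0, 0, 3)),
--     "bottom": (((1, 0, 0), (0, 0, 1), (0, 1, 0)), (0, 0, 0)),
--     "top":    (((1, 0, 0), (0, 0, 1), (0, 1, 0)), (0, 3, 0)),
--     "left":   (((0, 0, 1), (0, 1, 0), (1, 0, 0)), (0, 0, 0)),
--     "right":  (((0, 0, 1), (0, 1, 0), (1, 0, 0)), (3, 0, 0)),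
-- }
--
-- def terdimension(posicion, array):
--     t = _AFFINE.get(posicion)
--     if t is None:
--         return array
--     M, v = t
--     for i, row in enumerate(array):
--         array[i] = [sum(M[k][j] * row[j] for j in range(3)) + v[k]
--                     for k in range(3)] + row[3:]
--     return array
-- ===== Notes on version B (the rewrite author's own statement) =====
-- stated objective: alternative
-- what changed: Replaces A's three branch-local swap/add index loops by treating each orientation as an affine map (3x3 permutation matrix plus translation vector) and computing each row's first three coordinates by matrix-vector dot products, keeping any tail elements.
import Mathlib
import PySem

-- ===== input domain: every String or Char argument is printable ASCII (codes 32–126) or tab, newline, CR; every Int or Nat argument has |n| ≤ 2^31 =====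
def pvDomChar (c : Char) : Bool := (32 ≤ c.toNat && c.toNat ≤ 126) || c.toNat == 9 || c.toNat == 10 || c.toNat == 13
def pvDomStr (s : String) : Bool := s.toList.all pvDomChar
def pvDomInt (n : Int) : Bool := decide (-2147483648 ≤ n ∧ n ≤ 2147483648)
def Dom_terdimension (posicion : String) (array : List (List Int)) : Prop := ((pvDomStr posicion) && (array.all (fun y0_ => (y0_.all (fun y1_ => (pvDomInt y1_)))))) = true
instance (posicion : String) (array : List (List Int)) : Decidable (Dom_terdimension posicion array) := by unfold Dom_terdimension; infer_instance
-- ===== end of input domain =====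

-- B recasts each orientation as an affine map (permutation matrix + translation) and computes
-- rows by matrix-vector dot products ("alternative"). Both Pythons mutate the argument list in
-- place (A edits row cells, B replaces rows); the equivalence proved is about the return value.

-- ===== PORT A =====
-- A's loops "for i in range(len(array)): array[i] updates" are ported as foldl over the
-- index range, reading and writing row i of the accumulator each step.
def terdimension (posicion : String) (array : List (List Int)) : List (List Int) :=
  if posicion == "front" then
    (List.range array.length).foldl (fun acc i =>
      let row := acc.getD i []
      acc.set i (row.set 2 (row.getD 2 0 + 3))) array
  else if posicion == "bottom" || posicion == "top" then
    (List.range array.length).foldl (fun acc i =>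
      let row := acc.getD i []
      let row1 := (row.set 2 (row.getD 1 0)).set 1 (row.getD 2 0)
      let row2 := if posicion == "top" then row1.set 1 (row1.getD 1 0 + 3) else row1
      acc.set i row2) array
  else if posicion == "left" || posicion == "right" then
    (List.range array.length).foldl (fun acc i =>
      let row := acc.getD i []
      let row1 := (row.set 2 (row.getD 0 0)).set 0 (row.getD 2 0)
      let row2 := if posicion == "right" then row1.set 0 (row1.getD 0 0 + 3) else row1
      acc.set i row2) array
  else array

-- ===== PORT B =====
-- orientation -> (3x3 permutation matrix, translation vector)
def terdimensionAffine : PySem.Dict String (List (List Int) × List Int) :=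
  PySem.Dict.ofList
    [("front",  ([[1, 0, 0], [0, 1, 0], [0, 0, 1]], [0, 0, 3])),
     ("bottom", ([[1, 0, 0], [0, 0, 1], [0, 1, 0]], [0, 0, 0])),
     ("top",    ([[1, 0, 0], [0, 0, 1], [0, 1, 0]], [0, 3, 0])),
     ("left",   ([[0, 0, 1], [0, 1, 0], [1, 0, 0]], [0, 0, 0])),
     ("right",  ([[0, 0, 1], [0, 1, 0], [1, 0, 0]], [3, 0, 0]))]

-- new row = M @ row[:3] + v, followed by row[3:]
def terdimensionRow (M : List (List Int)) (v : List Int) (row : List Int) : List Int :=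
  ((List.range 3).map (fun k =>
    ((List.range 3).foldl (fun s j => s + (M.getD k []).getD j 0 * row.getD j 0) 0)
      + v.getD k 0))
  ++ row.drop 3

def terdimension_alt (posicion : String) (array : List (List Int)) : List (List Int) :=
  match PySem.Dict.get? terdimensionAffine posicion with
  | none => array
  | some (M, v) => array.map (terdimensionRow M v)

-- ===== PRECONDITION & SPEC =====
-- Pre_ excludes exactly the inputs where Python A raises IndexError: an orientation it
-- transforms together with a row shorter than 3.
def Pre_terdimension (posicion : String) (array : List (List Int)) : Prop :=
  (posicion = "front" ∨ posicion = "bottom" ∨ posicion = "top" ∨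
   posicion = "left" ∨ posicion = "right") →
  ∀ row ∈ array, 3 ≤ row.length
instance (posicion : String) (array : List (List Int)) : Decidable (Pre_terdimension posicion array) := by unfold Pre_terdimension; infer_instance

def pvWitness_terdimension : String × List (List Int) := ("top", [[1, 2, 3], [4, 5, 6]])

def Spec_terdimension (posicion : String) (array : List (List Int)) (out : List (List Int)) : Prop := out = terdimension_alt posicion array
instance (posicion : String) (array : List (List Int)) (out : List (List Int)) : Decidable (Spec_terdimension posicion array out) := by unfold Spec_terdimension; infer_instance

-- ===== CLAIM (what is proved, stated in full; the proofs are below) =====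
def Claim_equal_terdimension : Prop := ∀ (posicion : String) (array : List (List Int)), Dom_terdimension posicion array → Pre_terdimension posicion array → Spec_terdimension posicion array (terdimension posicion array)

-- ===== LEMMAS AND PROOFS =====

-- A's in-place index loop, started after an already-processed prefix, is a map over the rest.
theorem foldl_set_range' (f : List Int → List Int) :
    ∀ (arr pre : List (List Int)),
      (List.range' pre.length arr.length).foldl
        (fun acc i => acc.set i (f (acc.getD i []))) (pre ++ arr)
      = pre ++ arr.map f := by
  intro arr
  induction arr with
  | nil => intro pre; simp
  | cons r rest ih =>
    intro pre
    have hget : (pre ++ r :: rest).getD pre.length [] = r := by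
      simp [List.getD_eq_getElem?_getD]
    have hset : (pre ++ r :: rest).set pre.length (f r) = (pre ++ [f r]) ++ rest := by
      rw [List.set_append_right _ _ (le_refl pre.length)]
      simp
    simp only [List.length_cons, List.range'_succ, List.foldl_cons]
    rw [hget, hset]
    have hlen : pre.length + 1 = (pre ++ [f r]).length := by simp
    rw [hlen, ih (pre ++ [f r])]
    simp

theorem foldl_set_range (f : List Int → List Int) (arr : List (List Int)) :
    (List.range arr.length).foldl
      (fun acc i => acc.set i (f (acc.getD i []))) arr = arr.map f := by
  have h := foldl_set_range' f arr []
  simpa [List.range_eq_range'] using h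

-- A row of length ≥ 3 is three heads and a tail.
theorem row_shape (row : List Int) (h : 3 ≤ row.length) :
    ∃ a b c rest, row = a :: b :: c :: rest := by
  match row, h with
  | a :: b :: c :: rest, _ => exact ⟨a, b, c, rest, rfl⟩

-- ===== VERDICT (by name: the statement is the Claim_ definition above) =====
theorem terdimension_spec : Claim_equal_terdimension := by
  intro posicion array _ hpre
  unfold Spec_terdimension terdimension terdimension_alt
  by_cases hf : posicion = "front"
  · subst hf
    simp only [beq_self_eq_true, reduceIte]
    rw [foldl_set_range (fun row => row.set 2 (row.getD 2 0 + 3)) array]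
    have h3 := hpre (Or.inl rfl)
    refine Eq.trans ?_ rfl
    apply List.map_congr_left
    intro row hrow
    obtain ⟨a, b, c, rest, rfl⟩ := row_shape row (h3 row hrow)
    simp [terdimensionRow, List.range_succ]
  · by_cases hb : posicion = "bottom"
    · subst hb
      simp only [String.reduceBEq, Bool.or_false, Bool.false_eq_true, reduceIte]
      rw [foldl_set_range (fun row => (row.set 2 (row.getD 1 0)).set 1 (row.getD 2 0)) array]
      have h3 := hpre (Or.inr (Or.inl rfl))
      refine Eq.trans ?_ rfl
      apply List.map_congr_left
      intro row hrow
      obtain ⟨a, b, c, rest, rfl⟩ := row_shape row (h3 row hrow)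
      simp [terdimensionRow, List.range_succ]
    · by_cases ht : posicion = "top"
      · subst ht
        simp only [String.reduceBEq, Bool.or_false, Bool.false_or, beq_self_eq_true,
          Bool.false_eq_true, reduceIte]
        rw [foldl_set_range (fun row =>
          let row1 := (row.set 2 (row.getD 1 0)).set 1 (row.getD 2 0)
          row1.set 1 (row1.getD 1 0 + 3)) array]
        have h3 := hpre (Or.inr (Or.inr (Or.inl rfl)))
        refine Eq.trans ?_ rfl
        apply List.map_congr_left
        intro row hrow
        obtain ⟨a, b, c, rest, rfl⟩ := row_shape row (h3 row hrow)
        simp [terdimensionRow, List.range_succ]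
      · by_cases hl : posicion = "left"
        · subst hl
          simp only [String.reduceBEq, Bool.or_false, Bool.false_eq_true, reduceIte]
          rw [foldl_set_range (fun row => (row.set 2 (row.getD 0 0)).set 0 (row.getD 2 0)) array]
          have h3 := hpre (Or.inr (Or.inr (Or.inr (Or.inl rfl))))
          refine Eq.trans ?_ rfl
          apply List.map_congr_left
          intro row hrow
          obtain ⟨a, b, c, rest, rfl⟩ := row_shape row (h3 row hrow)
          simp [terdimensionRow, List.range_succ]
        · by_cases hr : posicion = "right"
          · subst hr
            simp only [String.reduceBEq, Bool.or_false, Bool.false_or, beq_self_eq_true,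
              Bool.false_eq_true, reduceIte]
            rw [foldl_set_range (fun row =>
              let row1 := (row.set 2 (row.getD 0 0)).set 0 (row.getD 2 0)
              row1.set 0 (row1.getD 0 0 + 3)) array]
            have h3 := hpre (Or.inr (Or.inr (Or.inr (Or.inr rfl))))
            refine Eq.trans ?_ rfl
            apply List.map_congr_left
            intro row hrow
            obtain ⟨a, b, c, rest, rfl⟩ := row_shape row (h3 row hrow)
            simp [terdimensionRow, List.range_succ]
          · have hf' : (posicion == "front") = false := by simp [hf]
            have hb' : (posicion == "bottom") = false := by simp [hb]
            have ht' : (posicion == "top") = false := by simp [ht]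
            have hl' : (posicion == "left") = false := by simp [hl]
            have hr' : (posicion == "right") = false := by simp [hr]
            have hf2 : ("front" == posicion) = false := by simp [Ne.symm hf]
            have hb2 : ("bottom" == posicion) = false := by simp [Ne.symm hb]
            have ht2 : ("top" == posicion) = false := by simp [Ne.symm ht]
            have hl2 : ("left" == posicion) = false := by simp [Ne.symm hl]
            have hr2 : ("right" == posicion) = false := by simp [Ne.symm hr]
            simp [hf', hb', ht', hl', hr', hf2, hb2, ht2, hl2, hr2, terdimensionAffine,
              PySem.Dict.ofList, PySem.Dict.get?, PySem.Dict.update, PySem.Dict.insert,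
              PySem.Dict.empty, List.find?]
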